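-- pv_equiv track=rewrite | github.com/ernestomgz/Corvus | web/import_md/services.py | _normalise_deck_path
-- ===== SOURCE A (Python) =====
-- def _normalise_deck_path(parts: list[str]) -> list[str]:
--     cleaned: list[str] = []
--     for part in parts:
--         if not part:
--             continue
--         normalised = part.strip()
--         lower = normalised.lower()
--         if not normalised or lower == 'default':
--             continue
--         if not cleaned and lower in {'notes'}:
--             continue
--         cleaned.append(normalised)
--     return cleaned
-- ===== SOURCE B (Python) =====
-- def _normalise_deck_path(parts: list[str]) -> list[str]:
--     # Phase 1: scan for the first "anchor" component — a part whose stripped form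
--     # is non-empty and is neither 'default' nor 'notes'.  Everything before it is
--     # dropped (empties/defaults always, 'notes' because nothing kept precedes it).
--     n = len(parts)
--     i = 0
--     first = None
--     while i < n:
--         p = parts[i]
--         s = p.strip() if p else ''
--         l = s.lower()
--         if s and l != 'default' and l != 'notes':
--             first = s
--             break
--         i += 1
--     if first is None:
--         return []
--     # Phase 2: past the anchor, 'notes' is kept; just strip and filter.
--     return [first] + [t for t in (q.strip() for q in parts[i + 1:] if q)
--                       if t and t.lower() != 'default']
-- ===== Notes on version B (the rewrite author's own statement) =====
-- stated objective: alternative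
-- what changed: Replaces A's single accumulator loop (whose 'not cleaned' guard decides the notes case) with a pivot search: a scan that never builds a list finds the first anchor component, then a comprehension strips/filters only the suffix after it.
import Mathlib
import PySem

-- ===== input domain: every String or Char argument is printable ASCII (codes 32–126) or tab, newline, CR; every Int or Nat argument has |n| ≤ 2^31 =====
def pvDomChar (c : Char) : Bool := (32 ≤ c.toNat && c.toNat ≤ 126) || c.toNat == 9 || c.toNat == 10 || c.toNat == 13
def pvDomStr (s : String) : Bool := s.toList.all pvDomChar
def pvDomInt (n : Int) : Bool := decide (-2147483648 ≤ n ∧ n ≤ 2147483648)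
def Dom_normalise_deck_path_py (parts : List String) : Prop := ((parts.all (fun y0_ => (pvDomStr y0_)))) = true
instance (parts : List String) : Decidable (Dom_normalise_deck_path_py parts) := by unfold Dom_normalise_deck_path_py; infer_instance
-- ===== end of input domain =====

-- B replaces A's single accumulator loop (whose `not cleaned` guard decides the 'notes'
-- case) with a pivot search for the first anchor component followed by a strip/filter
-- of the suffix after it; same cost, different decomposition.

-- ===== PORT A =====
def normalise_deck_path_py (parts : List String) : List String :=
  parts.foldl (fun cleaned part =>
    if part = "" then cleaned
    else
      let normalised := PySem.Str.strip part
      let lower := PySem.Str.lower normalised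
      if normalised = "" ∨ lower = "default" then cleaned
      else if cleaned = [] ∧ lower = "notes" then cleaned
      else cleaned ++ [normalised]) []

-- ===== PORT B =====
-- phase 2 of Source B: the comprehension over the suffix after the anchor
def pvTailFilter (rest : List String) : List String :=
  rest.filterMap (fun q =>
    if q = "" then none
    else
      let t := PySem.Str.strip q
      if t = "" ∨ PySem.Str.lower t = "default" then none else some t)

-- phase 1 of Source B: the while loop searching for the anchor (structural recursion over the
-- remaining components mirrors the index loop), then `[first] + tail comprehension`
def normalise_deck_path_py_alt (parts : List String) : List String :=
  match parts with
  | [] => []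
  | p :: rest =>
    let s := if p = "" then "" else PySem.Str.strip p
    let l := PySem.Str.lower s
    if s ≠ "" ∧ l ≠ "default" ∧ l ≠ "notes" then s :: pvTailFilter rest
    else normalise_deck_path_py_alt rest

-- ===== PRECONDITION & SPEC =====
def Spec_normalise_deck_path_py (parts : List String) (out : List String) : Prop := out = normalise_deck_path_py_alt parts
instance (parts : List String) (out : List String) : Decidable (Spec_normalise_deck_path_py parts out) := by unfold Spec_normalise_deck_path_py; infer_instance

-- ===== CLAIM (what is proved, stated in full; the proofs are below) =====
def Claim_equal_normalise_deck_path_py : Prop := ∀ (parts : List String), Dom_normalise_deck_path_py parts → Spec_normalise_deck_path_py parts (normalise_deck_path_py parts)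

-- ===== LEMMAS AND PROOFS =====

-- proof-only abstractions
def pvKeep (p : String) : Option String :=
  if p ≠ "" ∧ PySem.Str.strip p ≠ "" ∧ PySem.Str.lower (PySem.Str.strip p) ≠ "default"
  then some (PySem.Str.strip p) else none

def pvNotes (s : String) : Bool := PySem.Str.lower s == "notes"

def pvStep (cleaned : List String) (part : String) : List String :=
  match pvKeep part with
  | none => cleaned
  | some n => if cleaned = [] ∧ pvNotes n then cleaned else cleaned ++ [n]

theorem pvStep_eq :
    (fun (cleaned : List String) (part : String) =>
      if part = "" then cleaned
      else
        let normalised := PySem.Str.strip part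
        let lower := PySem.Str.lower normalised
        if normalised = "" ∨ lower = "default" then cleaned
        else if cleaned = [] ∧ lower = "notes" then cleaned
        else cleaned ++ [normalised]) = pvStep := by
  funext cleaned part
  simp only [pvStep, pvKeep, pvNotes]
  by_cases hp : part = "" <;>
    by_cases h1 : PySem.Str.strip part = "" <;>
      by_cases h2 : PySem.Str.lower (PySem.Str.strip part) = "default" <;>
        simp [hp, h1, h2]

theorem pvLoop_eq (parts : List String) (acc : List String) :
    parts.foldl pvStep acc
    = acc ++ (if acc = [] then (parts.filterMap pvKeep).dropWhile pvNotes
              else parts.filterMap pvKeep) := by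
  induction parts generalizing acc with
  | nil => simp
  | cons p ps ih =>
    simp only [List.foldl_cons, List.filterMap_cons]
    cases hk : pvKeep p with
    | none => simp [pvStep, hk, ih]
    | some n =>
      by_cases ha : acc = []
      · by_cases hn : pvNotes n = true
        · simp [pvStep, hk, ha, hn, ih]
        · simp [pvStep, hk, ha, hn, ih]
      · simp [pvStep, hk, ha, ih]

theorem pvTailFilter_eq (rest : List String) : pvTailFilter rest = rest.filterMap pvKeep := by
  unfold pvTailFilter
  congr 1
  funext q
  simp only [pvKeep]
  by_cases hq : q = "" <;>
    by_cases h1 : PySem.Str.strip q = "" <;>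
      by_cases h2 : PySem.Str.lower (PySem.Str.strip q) = "default" <;>
        simp [hq, h1, h2]

theorem pvAlt_eq (parts : List String) :
    normalise_deck_path_py_alt parts = (parts.filterMap pvKeep).dropWhile pvNotes := by
  induction parts with
  | nil => simp [normalise_deck_path_py_alt]
  | cons p rest ih =>
    simp only [normalise_deck_path_py_alt, List.filterMap_cons]
    by_cases hp : p = ""
    · simp [hp, pvKeep, ih]
    · by_cases h1 : PySem.Str.strip p = ""
      · simp [hp, h1, pvKeep, ih]
      · by_cases h2 : PySem.Str.lower (PySem.Str.strip p) = "default"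
        · simp [hp, h1, h2, pvKeep, ih]
        · by_cases h3 : PySem.Str.lower (PySem.Str.strip p) = "notes"
          · simp [hp, h1, h3, pvKeep, pvNotes, ih]
          · simp [hp, h1, h2, h3, pvKeep, pvNotes, pvTailFilter_eq]

-- ===== VERDICT (by name: the statement is the Claim_ definition above) =====
theorem normalise_deck_path_py_spec : Claim_equal_normalise_deck_path_py := by
  intro parts _
  unfold Spec_normalise_deck_path_py normalise_deck_path_py
  rw [pvStep_eq, pvLoop_eq, pvAlt_eq]
  simp
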